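-- pv_equiv track=rewrite | github.com/isaacgounton/griot-app | app/services/media/pexels_image_service.py | _get_best_image_url
-- ===== SOURCE A (Python) =====
-- from typing import Dict, Any, List, Optional
--
-- def _get_best_image_url(image: Dict, quality: str) -> Optional[str]:
--     """Get the best image URL from a Pexels image based on quality preference."""
--     src = image.get('src', {})
--
--     # Quality preference mapping
--     if quality == "ultra":
--         # Try original first, then large, then medium
--         for size in ['original', 'large2x', 'large', 'medium']:
--             if src.get(size):
--                 return src[size]
--     elif quality == "high":
--         # Try large first, then medium, then original
--         for size in ['large', 'large2x', 'medium', 'original']: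
--             if src.get(size):
--                 return src[size]
--     else:  # standard
--         # Try medium first, then small, then large
--         for size in ['medium', 'small', 'large']:
--             if src.get(size):
--                 return src[size]
--
--     # Fallback to any available URL
--     for size in ['original', 'large2x', 'large', 'medium', 'small', 'tiny']:
--         if src.get(size):
--             return src[size]
--
--     return None
-- ===== SOURCE B (Python) =====
-- # B: single bucket-filling pass over the src dict ENTRIES (not the preference
-- # list): each size gets a rank from a precomputed index table and its URL is
-- # dropped into the rank's slot; the answer is the first filled slot.
-- _FULL_ORDER = {
--     "ultra": ['original', 'large2x', 'large', 'medium', 'small', 'tiny'],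
--     "high": ['large', 'large2x', 'medium', 'original', 'small', 'tiny'],
--     "standard": ['medium', 'small', 'large', 'original', 'large2x', 'tiny'],
-- }
--
-- def _get_best_image_url(image, quality):
--     """Get the best image URL from a Pexels image based on quality preference."""
--     order = _FULL_ORDER.get(quality, _FULL_ORDER["standard"])
--     rank = {s: i for i, s in enumerate(order)}
--     slots = [None] * len(order)
--     for size, url in image.get('src', {}).items():
--         r = rank.get(size)
--         if r is not None and url and slots[r] is None:
--             slots[r] = url
--     return next((u for u in slots if u), None)
-- ===== Notes on version B (the rewrite author's own statement) =====
-- stated objective: alternative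
-- what changed: B makes one bucket-filling pass over the src dict's entries, slotting each URL by a precomputed per-quality rank of its size key and returning the first filled slot, instead of A's scans over preference-order lists with repeated src lookups; Pre_ only excludes src association lists with duplicate size keys, which cannot represent a Python dict.
import Mathlib
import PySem

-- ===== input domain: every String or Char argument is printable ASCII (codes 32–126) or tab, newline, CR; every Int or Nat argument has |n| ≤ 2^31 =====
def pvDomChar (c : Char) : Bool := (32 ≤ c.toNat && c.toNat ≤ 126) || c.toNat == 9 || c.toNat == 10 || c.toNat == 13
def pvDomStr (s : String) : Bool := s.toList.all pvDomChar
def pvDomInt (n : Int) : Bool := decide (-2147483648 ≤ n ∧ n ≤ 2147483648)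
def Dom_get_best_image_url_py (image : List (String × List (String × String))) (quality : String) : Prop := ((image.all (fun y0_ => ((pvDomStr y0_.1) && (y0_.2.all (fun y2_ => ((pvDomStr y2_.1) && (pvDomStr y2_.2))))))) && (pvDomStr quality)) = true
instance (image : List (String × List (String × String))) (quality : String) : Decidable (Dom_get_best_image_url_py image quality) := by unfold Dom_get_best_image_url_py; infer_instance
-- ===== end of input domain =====

-- B replaces A's scans over preference lists by one bucket-filling pass over the
-- src entries themselves (objective: alternative; same cost).

-- ===== PORT A =====
-- A's loop 'for size in sizes: if src.get(size): return src[size]' (falsy = missing or empty string)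
def pvScanA (src : List (String × String)) : List String → Option String
  | [] => none
  | s :: rest =>
    match src.lookup s with
    | some v => if v ≠ "" then some v else pvScanA src rest
    | none => pvScanA src rest

def get_best_image_url_py (image : List (String × List (String × String))) (quality : String) : Option String :=
  let src := (image.lookup "src").getD []
  let primary :=
    if quality = "ultra" then ["original", "large2x", "large", "medium"]
    else if quality = "high" then ["large", "large2x", "medium", "original"]
    else ["medium", "small", "large"]
  match pvScanA src primary with
  | some u => some u
  | none => pvScanA src ["original", "large2x", "large", "medium", "small", "tiny"]

-- ===== PORT B =====
def pvFullOrder : List (String × List String) :=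
  [("ultra", ["original", "large2x", "large", "medium", "small", "tiny"]),
   ("high", ["large", "large2x", "medium", "original", "small", "tiny"]),
   ("standard", ["medium", "small", "large", "original", "large2x", "tiny"])]

-- the dict comprehension {s: i for i, s in enumerate(order)} as an association list
def pvRanks : List String → Nat → List (String × Nat)
  | [], _ => []
  | s :: t, i => (s, i) :: pvRanks t (i + 1)

-- loop body: r = rank.get(size); if r is not None and url and slots[r] is None: slots[r] = url
def pvUpd (rank : List (String × Nat)) (slots : List (Option String)) (p : String × String) : List (Option String) :=
  match rank.lookup p.1 with
  | some r => if p.2 ≠ "" ∧ slots.getD r none = none then slots.set r (some p.2) else slots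
  | none => slots

-- 'u for u in slots if u' truthiness
def pvTruthy (o : Option String) : Option String :=
  match o with
  | some v => if v = "" then none else some v
  | none => none

def get_best_image_url_py_alt (image : List (String × List (String × String))) (quality : String) : Option String :=
  let order := (pvFullOrder.lookup quality).getD ((pvFullOrder.lookup "standard").getD [])
  let rank := pvRanks order 0
  let slots0 : List (Option String) := List.replicate order.length none
  let src := (image.lookup "src").getD []
  let slots := src.foldl (pvUpd rank) slots0
  slots.findSome? pvTruthy

-- ===== PRECONDITION & SPEC =====
-- Pre_ excludes src association lists with duplicate size keys: a Python dict cannot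
-- have duplicate keys, so such lists represent no Python input; on them the
-- first-match-lookup vs first-entry-slot corners are both accidental.
def Pre_get_best_image_url_py (image : List (String × List (String × String))) (quality : String) : Prop :=
  ((((image.lookup "src").getD []).map Prod.fst).Nodup)
instance (image : List (String × List (String × String))) (quality : String) : Decidable (Pre_get_best_image_url_py image quality) := by unfold Pre_get_best_image_url_py; infer_instance

def pvWitness_get_best_image_url_py : (List (String × List (String × String))) × String :=
  ([("src", [("medium", "m.jpg"), ("tiny", "t.jpg")])], "high")

def Spec_get_best_image_url_py (image : List (String × List (String × String))) (quality : String) (out : Option String) : Prop := out = get_best_image_url_py_alt image quality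
instance (image : List (String × List (String × String))) (quality : String) (out : Option String) : Decidable (Spec_get_best_image_url_py image quality out) := by unfold Spec_get_best_image_url_py; infer_instance

-- ===== CLAIM (what is proved, stated in full; the proofs are below) =====
def Claim_equal_get_best_image_url_py : Prop := ∀ (image : List (String × List (String × String))) (quality : String), Dom_get_best_image_url_py image quality → Pre_get_best_image_url_py image quality → Spec_get_best_image_url_py image quality (get_best_image_url_py image quality)

-- ===== LEMMAS AND PROOFS =====

-- the truthy-lookup test both programs apply to a size key
def pvF (src : List (String × String)) (s : String) : Option String :=
  match src.lookup s with
  | some v => if v = "" then none else some v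
  | none => none

-- A's scan is findSome? of pvF
theorem pvScanA_eq_findSome? (src : List (String × String)) (l : List String) :
    pvScanA src l = l.findSome? (pvF src) := by
  induction l with
  | nil => rfl
  | cons s rest ih =>
    simp only [pvScanA, List.findSome?_cons, pvF]
    cases src.lookup s with
    | none => exact ih
    | some v => by_cases h : v = "" <;> simp [h, ih]

-- two-phase scan = one scan of the merged list
theorem pv_merge (g : String → Option String) (p c : List String)
    (h : (p.findSome? g).or ((["original", "large2x", "large", "medium", "small", "tiny"] : List String).findSome? g) = c.findSome? g) :
    (match p.findSome? g with
     | some u => some u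
     | none => (["original", "large2x", "large", "medium", "small", "tiny"] : List String).findSome? g) = c.findSome? g := by
  rw [← h]; cases p.findSome? g <;> rfl

-- rank-table characterization
theorem pvRanks_lookup_some (L : List String) :
    ∀ (i : Nat) (k : String) (r : Nat), (pvRanks L i).lookup k = some r →
      i ≤ r ∧ r - i < L.length ∧ L.getD (r - i) "" = k := by
  induction L with
  | nil => intro i k r h; simp [pvRanks] at h
  | cons s t ih =>
    intro i k r h
    simp only [pvRanks, List.lookup] at h
    by_cases hk : k = s
    · rw [show (k == s) = true from beq_iff_eq.mpr hk] at h
      simp only [] at h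
      obtain rfl : i = r := by simpa using h
      simp [hk]
    · rw [show (k == s) = false from beq_eq_false_iff_ne.mpr hk] at h
      simp only [] at h
      obtain ⟨h1, h2, h3⟩ := ih (i + 1) k r h
      refine ⟨by omega, by simp; omega, ?_⟩
      have : r - i = (r - (i + 1)) + 1 := by omega
      rw [this]; simpa using h3

theorem pvRanks_lookup_mem (L : List String) :
    ∀ (i : Nat) (k : String), k ∈ L → ((pvRanks L i).lookup k).isSome = true := by
  induction L with
  | nil => intro _ _ h; simp at h
  | cons s t ih =>
    intro i k h
    simp only [pvRanks, List.lookup]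
    by_cases hk : k = s
    · rw [show (k == s) = true from beq_iff_eq.mpr hk]; rfl
    · rw [show (k == s) = false from beq_eq_false_iff_ne.mpr hk]
      exact ih (i + 1) k (by rcases List.mem_cons.1 h with h | h; exact absurd h hk; exact h)

theorem pvUpd_length (rank : List (String × Nat)) (slots : List (Option String)) (p : String × String) :
    (pvUpd rank slots p).length = slots.length := by
  unfold pvUpd
  cases rank.lookup p.1 with
  | none => rfl
  | some r => dsimp only; split_ifs <;> simp

theorem pvFold_length (rank : List (String × Nat)) :
    ∀ (src : List (String × String)) (slots : List (Option String)),
      (src.foldl (pvUpd rank) slots).length = slots.length := by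
  intro src
  induction src with
  | nil => intro slots; rfl
  | cons e t ih => intro slots; simp only [List.foldl_cons]; rw [ih, pvUpd_length]

-- lookup misses when the key is absent
theorem pvLookup_none (k : String) : ∀ (t : List (String × String)), k ∉ t.map Prod.fst → t.lookup k = none := by
  intro t
  induction t with
  | nil => intro _; rfl
  | cons p s ih =>
    intro h
    rw [List.map_cons, List.mem_cons] at h
    push Not at h
    simp only [List.lookup]
    rw [show (k == p.1) = false from beq_eq_false_iff_ne.mpr h.1]
    exact ih h.2

-- pvF on a cons whose key differs from the queried size
theorem pvF_cons_ne (e : String × String) (t : List (String × String)) (s : String) (h : s ≠ e.1) :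
    pvF (e :: t) s = pvF t s := by
  unfold pvF
  rw [show List.lookup s (e :: t) = t.lookup s by
    simp only [List.lookup]
    rw [show (s == e.1) = false from beq_eq_false_iff_ne.mpr h]]

-- the bucket pass fills slot r with pvF of the r-th size key
theorem pvFold_getD (L : List String) (hL : L.Nodup) :
    ∀ (src : List (String × String)), ((src.map Prod.fst).Nodup) →
    ∀ (slots : List (Option String)), slots.length = L.length →
    ∀ (r : Nat), r < L.length →
      (src.foldl (pvUpd (pvRanks L 0)) slots).getD r none
        = (slots.getD r none).or (pvF src (L.getD r "")) := by
  intro src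
  induction src with
  | nil =>
    intro _ slots _ r _
    simp [pvF, List.lookup]
  | cons e t ih =>
    intro hnd slots hlen r hr
    have hnd' : (e.1 :: t.map Prod.fst).Nodup := by rw [List.map_cons] at hnd; exact hnd
    obtain ⟨hnotin, hndt⟩ := List.nodup_cons.1 hnd' 
    simp only [List.foldl_cons]
    cases hlk : (pvRanks L 0).lookup e.1 with
    | none =>
      -- e.1 is not a size key of L
      have hnm : e.1 ∉ L := by
        intro hmem
        have := pvRanks_lookup_mem L 0 e.1 hmem
        rw [hlk] at this; simp at this
      have hupd : pvUpd (pvRanks L 0) slots e = slots := by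
        unfold pvUpd; rw [hlk]
      rw [hupd, ih hndt slots hlen r hr]
      have : L.getD r "" ≠ e.1 := by
        intro h
        exact hnm (h ▸ (by rw [List.getD_eq_getElem L "" hr]; exact L.getElem_mem hr))
      rw [pvF_cons_ne e t _ this]
    | some r0 =>
      obtain ⟨_, hr0, hkey⟩ := pvRanks_lookup_some L 0 e.1 r0 hlk
      simp only [Nat.sub_zero] at hr0 hkey
      have hlen' : (pvUpd (pvRanks L 0) slots e).length = L.length := by
        rw [pvUpd_length]; exact hlen
      rw [ih hndt _ hlen' r hr]
      by_cases hrr : r = r0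
      · subst hrr
        -- pvF t (L[r]) = none since e.1 = L[r] not a key of t
        have hft : pvF t (L.getD r "") = none := by
          unfold pvF
          rw [pvLookup_none _ t (by rw [hkey]; exact hnotin)]
        rw [hft, Option.or_none]
        have hfe : pvF (e :: t) (L.getD r "") = (if e.2 = "" then none else some e.2) := by
          unfold pvF
          rw [show List.lookup (L.getD r "") (e :: t) = some e.2 by
            simp only [List.lookup]
            rw [show (L.getD r "" == e.1) = true from beq_iff_eq.mpr hkey]]
        rw [hfe]
        unfold pvUpd; rw [hlk]; dsimp only
        have hrlen : r < slots.length := by rw [hlen]; exact hr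
        by_cases hv : e.2 = ""
        · rw [if_neg (by simp [hv])]
          simp [hv]
        · by_cases hs : slots.getD r none = none
          · rw [if_pos ⟨hv, hs⟩]
            have : (slots.set r (some e.2)).getD r none = some e.2 := by
              simp [List.getD, hrlen]
            rw [this, hs]
            simp [hv]
          · rw [if_neg (by tauto)]
            cases hslot : slots.getD r none with
            | none => exact absurd hslot hs
            | some u => simp [hv]
      · -- other slots untouched; head entry irrelevant to pvF at L[r]
        have hne : L.getD r "" ≠ e.1 := by
          rw [← hkey]
          rw [List.getD_eq_getElem L "" hr, List.getD_eq_getElem L "" hr0]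
          intro h
          exact hrr (List.Nodup.getElem_inj_iff hL |>.1 h)
        rw [pvF_cons_ne e t _ hne]
        have hupd : (pvUpd (pvRanks L 0) slots e).getD r none = slots.getD r none := by
          unfold pvUpd; rw [hlk]; dsimp only
          split_ifs with h
          · simp [List.getD, List.getElem?_set_ne (fun h => hrr h.symm)]
          · rfl
        rw [hupd]

theorem pvTruthy_pvF (src : List (String × String)) (s : String) :
    pvTruthy (pvF src s) = pvF src s := by
  unfold pvTruthy pvF
  cases src.lookup s with
  | none => rfl
  | some v => by_cases h : v = "" <;> simp [h]

-- B's whole computation equals findSome? of pvF over the order list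
theorem pvAlt_eq_findSome (L : List String) (hL : L.Nodup)
    (src : List (String × String)) (hsrc : (src.map Prod.fst).Nodup) :
    (src.foldl (pvUpd (pvRanks L 0)) (List.replicate L.length none)).findSome? pvTruthy
      = L.findSome? (pvF src) := by
  have hlen : (src.foldl (pvUpd (pvRanks L 0)) (List.replicate L.length none)).length = L.length := by
    rw [pvFold_length]; simp
  have hgetD : ∀ r, r < L.length →
      (src.foldl (pvUpd (pvRanks L 0)) (List.replicate L.length none)).getD r none
        = pvF src (L.getD r "") := by
    intro r hr
    rw [pvFold_getD L hL src hsrc _ (by simp) r hr]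
    simp [List.getD, hr]
  have hslots : src.foldl (pvUpd (pvRanks L 0)) (List.replicate L.length none)
      = L.map (pvF src) := by
    apply List.ext_getElem (by simp [hlen])
    intro r h1 h2
    have hr : r < L.length := by simpa using h2
    have := hgetD r hr
    rw [List.getD_eq_getElem _ none h1, List.getD_eq_getElem L "" hr] at this
    simpa using this
  rw [hslots, List.findSome?_map]
  congr 1
  funext s
  exact pvTruthy_pvF src s

theorem get_best_image_url_py_spec : Claim_equal_get_best_image_url_py := by
  intro image quality _ hpre
  unfold Spec_get_best_image_url_py get_best_image_url_py get_best_image_url_py_alt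
  have hsrc : ((((image.lookup "src").getD []).map Prod.fst).Nodup) := hpre
  simp only [pvScanA_eq_findSome?]
  by_cases hu : quality = "ultra"
  · subst hu
    rw [if_pos rfl,
      show (pvFullOrder.lookup "ultra").getD ((pvFullOrder.lookup "standard").getD [])
        = ["original", "large2x", "large", "medium", "small", "tiny"] from rfl,
      pvAlt_eq_findSome _ (by decide) _ hsrc]
    apply pv_merge
    set g := pvF (((image.lookup "src").getD [])) with hg
    simp only [List.findSome?_cons, List.findSome?_nil]
    cases g "original" <;> cases g "large2x" <;> cases g "large" <;> cases g "medium" <;> rfl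
  · by_cases hh : quality = "high"
    · subst hh
      rw [if_neg (by decide), if_pos rfl,
        show (pvFullOrder.lookup "high").getD ((pvFullOrder.lookup "standard").getD [])
          = ["large", "large2x", "medium", "original", "small", "tiny"] from rfl,
        pvAlt_eq_findSome _ (by decide) _ hsrc]
      apply pv_merge
      set g := pvF (((image.lookup "src").getD [])) with hg
      simp only [List.findSome?_cons, List.findSome?_nil]
      cases g "large" <;> cases g "large2x" <;> cases g "medium" <;> cases g "original" <;> rfl
    · have horder : (pvFullOrder.lookup quality).getD ((pvFullOrder.lookup "standard").getD [])
          = ["medium", "small", "large", "original", "large2x", "tiny"] := by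
        by_cases hs : quality = "standard"
        · subst hs; rfl
        · have h1 : (quality == "ultra") = false := beq_eq_false_iff_ne.mpr hu
          have h2 : (quality == "high") = false := beq_eq_false_iff_ne.mpr hh
          have h3 : (quality == "standard") = false := beq_eq_false_iff_ne.mpr hs
          have hq : pvFullOrder.lookup quality = none := by
            simp [pvFullOrder, List.lookup, h1, h2, h3]
          rw [hq]; rfl
      rw [if_neg hu, if_neg hh, horder, pvAlt_eq_findSome _ (by decide) _ hsrc]
      apply pv_merge
      set g := pvF (((image.lookup "src").getD [])) with hg
      simp only [List.findSome?_cons, List.findSome?_nil]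
      cases g "medium" <;> cases g "small" <;> cases g "large" <;> cases g "original" <;>
        cases g "large2x" <;> rfl
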